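-- pv_equiv track=rewrite | github.com/aky360/A.I. | Python/Strings/revAlphabet.py | reciprocalString
-- ===== SOURCE A (Python) =====
-- def reciprocalString(S):
--     dicS, dicL, ans = {}, {}, ""
--     for i in range(26):
--         dicL[chr(65+i)] = chr(90-i)
--         dicS[chr(97+i)] = chr(122-i)
--     for val in S:
--         if val!=' ':
--             if val in dicS.keys(): ans += dicS.get(val)
--             if val in dicL.keys(): ans += dicL.get(val)
--         else: ans += " "
--     return ans
-- ===== SOURCE B (Python) =====
-- _SRC = "abcdefghijklmnopqrstuvwxyzABCDEFGHIJKLMNOPQRSTUVWXYZ"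
-- _DST = "zyxwvutsrqponmlkjihgfedcbaZYXWVUTSRQPONMLKJIHGFEDCBA"
-- _TAB = str.maketrans(_SRC, _DST)
--
--
-- def reciprocalString(S):
--     # split on spaces, scrub each word down to its letters, translate the word
--     # through the reversed-alphabet table, and stitch the words back with spaces
--     return ' '.join(''.join(filter(str.isalpha, w)).translate(_TAB)
--                     for w in S.split(' '))
-- ===== Notes on version B (the rewrite author's own statement) =====
-- stated objective: idiomatic
-- what changed: Replaces the explicit per-character loop with dict lookups and string concatenation by a staged builtin pipeline: split the string on spaces, filter each word to its letters, translate each word through one str.maketrans reversed-alphabet table, and join the words back with spaces.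
import Mathlib
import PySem

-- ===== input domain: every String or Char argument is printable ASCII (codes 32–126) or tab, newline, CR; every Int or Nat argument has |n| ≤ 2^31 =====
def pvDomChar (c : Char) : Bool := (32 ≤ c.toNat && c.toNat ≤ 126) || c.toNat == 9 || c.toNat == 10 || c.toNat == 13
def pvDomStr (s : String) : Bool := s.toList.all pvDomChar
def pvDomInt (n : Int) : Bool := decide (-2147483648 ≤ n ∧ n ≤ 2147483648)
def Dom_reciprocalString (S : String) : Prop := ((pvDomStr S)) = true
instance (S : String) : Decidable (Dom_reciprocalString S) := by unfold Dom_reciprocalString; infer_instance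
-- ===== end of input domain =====

-- B replaces A's per-character loop over two prebuilt dicts by a staged pipeline:
-- split on spaces, filter each word to its letters, translate through one
-- reversed-alphabet table, join back with spaces (objective: idiomatic).


-- ===== PORT A =====
-- the loop 'for i in range(26): dicL[chr(65+i)] = chr(90-i); dicS[chr(97+i)] = chr(122-i)'
-- (both dicts carried as a pair, as the Python updates both in the same iteration)
def pvDictsA : PySem.Dict Char Char × PySem.Dict Char Char :=
  (PySem.List.pyRange 0 26 1).foldl
    (fun (p : PySem.Dict Char Char × PySem.Dict Char Char) i =>
      (p.1.insert (Char.ofNat (65 + i).toNat) (Char.ofNat (90 - i).toNat),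
       p.2.insert (Char.ofNat (97 + i).toNat) (Char.ofNat (122 - i).toNat)))
    (PySem.Dict.empty, PySem.Dict.empty)

-- the body of 'for val in S'; 'dicS.get(val)' is ported as getD under the contains guard
-- (the guard guarantees the key is present, so the default ' ' is never used)
def pvStepA (ans : List Char) (val : Char) : List Char :=
  if val ≠ ' ' then
    let ans := if pvDictsA.2.contains val then ans ++ [pvDictsA.2.getD val ' '] else ans
    if pvDictsA.1.contains val then ans ++ [pvDictsA.1.getD val ' '] else ans
  else ans ++ [' ']

def reciprocalString (S : String) : String :=
  String.ofList (S.toList.foldl pvStepA [])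

-- ===== PORT B =====
-- _TAB = str.maketrans(_SRC, _DST): the dict built by zipping the two strings
-- (str.translate keeps a character absent from the table, hence getD c c below)
def pvTabB : PySem.Dict Char Char :=
  (List.zip "abcdefghijklmnopqrstuvwxyzABCDEFGHIJKLMNOPQRSTUVWXYZ".toList
            "zyxwvutsrqponmlkjihgfedcbaZYXWVUTSRQPONMLKJIHGFEDCBA".toList).foldl
    (fun d p => d.insert p.1 p.2) PySem.Dict.empty

-- ''.join(filter(str.isalpha, w)).translate(_TAB)
-- (PySem.Chars.isalpha is exact on the ASCII domain; translate = map the table over the word)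
def pvWordB (w : List Char) : List Char :=
  (w.filter PySem.Chars.isalpha).map (fun c => pvTabB.getD c c)

-- ' '.join(... for w in S.split(' '))
def reciprocalString_alt (S : String) : String :=
  String.ofList (PySem.Chars.join [' '] ((PySem.Chars.splitOn S.toList [' ']).map pvWordB))

-- ===== PRECONDITION & SPEC =====
def Spec_reciprocalString (S : String) (out : String) : Prop := out = reciprocalString_alt S
instance (S : String) (out : String) : Decidable (Spec_reciprocalString S out) := by unfold Spec_reciprocalString; infer_instance

-- ===== CLAIM (what is proved, stated in full; the proofs are below) =====
def Claim_equal_reciprocalString : Prop := ∀ (S : String), Dom_reciprocalString S → Spec_reciprocalString S (reciprocalString S)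

-- ===== LEMMAS AND PROOFS =====

-- the per-character contribution both sides produce (A's, by its dict lookups)
def pvPieceC (c : Char) : List Char :=
  if c = ' ' then [' ']
  else if PySem.Chars.isalpha c then [pvTabB.getD c c] else []

-- A's step prepends the accumulator to a piece that depends only on the character
theorem pvStepA_append (ans : List Char) (val : Char) :
    pvStepA ans val = ans ++ pvStepA [] val := by
  unfold pvStepA
  by_cases h0 : val = ' ' <;>
    by_cases h1 : pvDictsA.2.contains val <;>
      by_cases h2 : pvDictsA.1.contains val <;> simp [h0, h1, h2]

-- on every ASCII character (all that the domain admits) A's piece is the common piece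
set_option maxRecDepth 8192 in
theorem pvStepA_eq_pieceC_ofNat : ∀ n : Nat, n < 128 →
    pvStepA [] (Char.ofNat n) = pvPieceC (Char.ofNat n) := by decide

theorem pvStepA_eq_pieceC (c : Char) (h : pvDomChar c = true) :
    pvStepA [] c = pvPieceC c := by
  have hn : c.toNat < 128 := by
    simp only [pvDomChar, Bool.or_eq_true, Bool.and_eq_true, decide_eq_true_eq,
      beq_iff_eq] at h
    omega
  have := pvStepA_eq_pieceC_ofNat c.toNat hn
  rwa [Char.ofNat_toNat] at this

-- A's loop flattens the per-character pieces
theorem pvLoopA_eq (l : List Char) (h : l.all pvDomChar = true) :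
    l.foldl pvStepA [] = l.flatMap pvPieceC := by
  have hcongr : l.foldl pvStepA [] = l.foldl (fun acc x => acc ++ pvPieceC x) [] := by
    refine PySem.List.foldl_congr_mem _ _ _ _ (fun acc x hx => ?_)
    rw [pvStepA_append, pvStepA_eq_pieceC x (by
      simp only [List.all_eq_true] at h; exact h x hx)]
  rw [hcongr, PySem.List.foldl_append_eq_flatMap]
  simp

-- PySem's fuel-based split on [' '] is Mathlib's splitOnP (· == ' ')
theorem pvGo_spec (fuel : Nat) (l cur : List Char) (acc : List (List Char))
    (h : l.length ≤ fuel) :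
    PySem.Chars.splitOn.go [' '] fuel l cur acc =
      acc.reverse ++ (l.splitOnP (· == ' ')).modifyHead (cur.reverse ++ ·) := by
  induction fuel generalizing l cur acc with
  | zero =>
    have : l = [] := by cases l <;> simp_all
    subst this
    simp [PySem.Chars.splitOn.go, List.splitOnP_nil]
  | succ f ih =>
    cases l with
    | nil => simp [PySem.Chars.splitOn.go, List.splitOnP_nil]
    | cons c rest =>
      rw [PySem.Chars.splitOn.go]
      by_cases hc : c = ' '
      · subst hc
        have hpre : [' '].isPrefixOf (' ' :: rest) = true := by simp [List.isPrefixOf]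
        rw [if_pos hpre]
        simp only [List.length_cons] at h
        rw [ih (List.drop [' '].length (' ' :: rest)) [] (cur.reverse :: acc) (by simp; omega)]
        simp only [List.splitOnP_cons, beq_self_eq_true, if_pos, List.reverse_cons,
          List.append_assoc, List.singleton_append, List.reverse_nil, List.nil_append]
        rcases hsp : rest.splitOnP (· == ' ') with _ | ⟨hd, tl⟩
        · exact absurd hsp (List.splitOnP_ne_nil _ _)
        · simp [hsp]
      · have hpre : [' '].isPrefixOf (c :: rest) = false := by
          simp [List.isPrefixOf]; exact fun hh => hc hh.symm
        rw [if_neg (by simp [hpre])]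
        rw [ih rest (c :: cur) acc (by simp at h; omega)]
        rw [List.splitOnP_cons]
        simp only [beq_iff_eq, if_neg hc]
        rcases hsp : rest.splitOnP (· == ' ') with _ | ⟨hd, tl⟩
        · exact absurd hsp (List.splitOnP_ne_nil _ _)
        · simp

theorem pvSplit_eq (l : List Char) :
    PySem.Chars.splitOn l [' '] = l.splitOnP (· == ' ') := by
  unfold PySem.Chars.splitOn
  rw [pvGo_spec _ _ _ _ (by omega)]
  rcases h : l.splitOnP (· == ' ') with _ | ⟨hd, tl⟩
  · exact absurd h (List.splitOnP_ne_nil _ _)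
  · simp

-- B's word map distributes over cons of a character
theorem pvWordB_cons (c : Char) (w : List Char) :
    pvWordB (c :: w) =
      (if PySem.Chars.isalpha c then [pvTabB.getD c c] else []) ++ pvWordB w := by
  unfold pvWordB
  by_cases h : PySem.Chars.isalpha c <;> simp [h]

-- join/split/filter/translate flattens to the same per-character pieces (no domain needed)
theorem pvSideB_eq (l : List Char) :
    PySem.Chars.join [' '] ((l.splitOnP (· == ' ')).map pvWordB) = l.flatMap pvPieceC := by
  induction l with
  | nil => simp [List.splitOnP_nil, PySem.Chars.join, List.intercalate, pvWordB]
  | cons c rest ih =>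
    rw [List.splitOnP_cons]
    by_cases hc : c = ' '
    · subst hc
      simp only [beq_self_eq_true, if_pos]
      rcases h : rest.splitOnP (· == ' ') with _ | ⟨hd, tl⟩
      · exact absurd h (List.splitOnP_ne_nil _ _)
      · rw [h] at ih
        simp only [List.map_cons, List.flatMap_cons]
        rw [← ih]
        simp [pvWordB, PySem.Chars.join, List.intercalate, List.intersperse, pvPieceC]
    · simp only [beq_iff_eq, if_neg hc]
      rcases h : rest.splitOnP (· == ' ') with _ | ⟨hd, tl⟩
      · exact absurd h (List.splitOnP_ne_nil _ _)
      · rw [h] at ih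
        simp only [List.modifyHead, List.map_cons, pvWordB_cons, List.flatMap_cons]
        rw [← ih]
        simp only [List.map_cons]
        have hpiece : pvPieceC c = if PySem.Chars.isalpha c then [pvTabB.getD c c] else [] := by
          simp [pvPieceC, hc]
        rw [hpiece]
        cases tl with
        | nil => simp [PySem.Chars.join, List.intercalate]
        | cons b tbl =>
          simp [PySem.Chars.join, List.intercalate]

-- ===== VERDICT (by name: the statement is the Claim_ definition above) =====
theorem reciprocalString_spec : Claim_equal_reciprocalString := by
  intro S hdom
  unfold Spec_reciprocalString reciprocalString reciprocalString_alt
  rw [pvLoopA_eq S.toList hdom, pvSplit_eq, pvSideB_eq]
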